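-- pv_equiv track=rewrite | github.com/gruntfutuk/learningpython | countlast2.py | stuart_count2
-- ===== SOURCE A (Python) =====
-- def stuart_count2(source):
--     ''' return count occurrences of last 2 char
--     substring in preceding part of source string '''
--     count = 0
--     if source[3:]:
--         search = source[-2:]
--         prev = source[0]
--         for ch in source[1:-2]:
--             if prev + ch == search:
--                 count += 1
--             prev = ch
--     return count
-- ===== SOURCE B (Python) =====
-- def stuart_count2(source):
--     ''' return count occurrences of last 2 char
--     substring in preceding part of source string '''
--     count = 0
--     if source[3:]:
--         search = source[-2:]
--         hay = source[:-2]
--         idx = hay.find(search)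
--         while idx != -1:
--             count += 1
--             idx = hay.find(search, idx + 1)
--     return count
-- ===== Notes on version B (the rewrite author's own statement) =====
-- stated objective: idiomatic
-- what changed: replaces the manual previous-char pair scan with library substring search: B slices off the haystack source[:-2] once and counts overlapping occurrences with a str.find skip-ahead loop
import Mathlib
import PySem

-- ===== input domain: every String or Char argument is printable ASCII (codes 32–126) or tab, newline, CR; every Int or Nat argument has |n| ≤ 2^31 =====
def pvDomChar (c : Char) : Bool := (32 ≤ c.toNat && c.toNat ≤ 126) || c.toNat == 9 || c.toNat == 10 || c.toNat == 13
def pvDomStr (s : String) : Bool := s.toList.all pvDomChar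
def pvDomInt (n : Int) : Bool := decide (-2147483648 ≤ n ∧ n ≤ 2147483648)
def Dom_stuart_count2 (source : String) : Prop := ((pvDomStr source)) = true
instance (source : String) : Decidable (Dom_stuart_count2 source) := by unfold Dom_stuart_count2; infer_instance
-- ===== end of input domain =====

-- B replaces A's manual previous-char pair scan by a library substring search over source[:-2]
-- with a find(…, idx+1) skip-ahead loop (idiomatic; same asymptotic cost).

-- ===== PORT A =====
def stuart_count2 (source : String) : Int :=
  let cs := source.toList
  if PySem.List.slice cs (some 3) none ≠ ([] : List Char) then
    let search := PySem.List.slice cs (some (-2)) none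
    -- source[0]: in range, since the guard gives cs.length ≥ 4
    let prev := (PySem.List.pyGet? cs 0).getD ' '
    ((PySem.List.slice cs (some 1) (some (-2))).foldl
      (fun (st : Int × Char) ch => (if [st.2, ch] = search then st.1 + 1 else st.1, ch))
      ((0 : Int), prev)).1
  else 0

-- ===== PORT B =====
-- the while loop: idx = hay.find(search, start); if -1 stop, else count and continue at idx+1
def pvFindLoop (hay pat : List Char) (hpat : pat ≠ []) (start : Nat)
    (hs : start ≤ hay.length) (cnt : Int) : Int :=
  if h : PySem.Chars.findFrom hay pat (start : Int) none = -1 then cnt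
  else
    have hspec := PySem.Chars.findFrom_natCast_spec hay pat start hs h
    have hlt : (PySem.Chars.findFrom hay pat (start : Int) none).toNat < hay.length := by
      rcases hspec.2.1 with ⟨t, ht⟩
      have hlen : pat.length ≤ (hay.drop (PySem.Chars.findFrom hay pat (start : Int) none).toNat).length := by
        rw [← ht]; simp
      have hp : 0 < pat.length := List.length_pos_iff.mpr hpat
      simp only [List.length_drop] at hlen
      omega
    pvFindLoop hay pat hpat ((PySem.Chars.findFrom hay pat (start : Int) none).toNat + 1) (by omega) (cnt + 1)
termination_by hay.length - start
decreasing_by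
  have _hge : (start : Int) ≤ PySem.Chars.findFrom hay pat (start : Int) none := hspec.1
  omega

def stuart_count2_alt (source : String) : Int :=
  let cs := source.toList
  if h : PySem.List.slice cs (some 3) none ≠ ([] : List Char) then
    let search := PySem.List.slice cs (some (-2)) none
    let hay := PySem.List.slice cs none (some (-2))
    have h4 : 3 < cs.length := by
      rw [PySem.List.slice_from cs (by omega : (0:Int) ≤ 3)] at h
      rw [ne_eq, List.drop_eq_nil_iff, not_le] at h
      simpa using h
    have hpat : search ≠ ([] : List Char) := by
      show PySem.List.slice cs (some (-2)) none ≠ []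
      rw [PySem.List.slice_from_neg_ofNat cs 2 (by omega)]
      rw [ne_eq, List.drop_eq_nil_iff, not_le]
      omega
    pvFindLoop hay search hpat 0 (Nat.zero_le _) 0
  else 0

-- ===== PRECONDITION & SPEC =====
def Spec_stuart_count2 (source : String) (out : Int) : Prop := out = stuart_count2_alt source
instance (source : String) (out : Int) : Decidable (Spec_stuart_count2 source out) := by unfold Spec_stuart_count2; infer_instance

-- ===== CLAIM (what is proved, stated in full; the proofs are below) =====
def Claim_equal_stuart_count2 : Prop := ∀ (source : String), Dom_stuart_count2 source → Spec_stuart_count2 source (stuart_count2 source)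

-- ===== LEMMAS AND PROOFS =====

-- number of suffixes of s that pat is a prefix of (= overlapping occurrences of pat in s)
def countOcc (pat : List Char) : List Char → Nat
  | [] => 0
  | x :: t => (if pat <+: x :: t then 1 else 0) + countOcc pat t

lemma countOcc_eq_zero (pat : List Char) :
    ∀ (s : List Char), ¬ pat <:+: s → countOcc pat s = 0 := by
  intro s
  induction s with
  | nil => intro _; rfl
  | cons x t ih =>
    intro h
    have h1 : ¬ pat <+: x :: t := fun hp => h hp.isInfix
    have h2 : ¬ pat <:+: t := fun hi => h (List.infix_cons hi)
    simp [countOcc, h1, ih h2]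

lemma countOcc_drop (pat : List Char) :
    ∀ (k : Nat) (s : List Char), k ≤ s.length → (∀ j, j < k → ¬ pat <+: s.drop j) →
      countOcc pat s = countOcc pat (s.drop k) := by
  intro k
  induction k with
  | zero => intro s _ _; simp
  | succ k ih =>
    intro s hk hj
    cases s with
    | nil => simp at hk
    | cons x t =>
      have h0 : ¬ pat <+: x :: t := by simpa using hj 0 (Nat.succ_pos k)
      have : countOcc pat (x :: t) = countOcc pat t := by simp [countOcc, h0]
      rw [this, List.drop_succ_cons]
      exact ih t (by simpa using hk) (fun j hjk => by simpa using hj (j + 1) (by omega))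

lemma countOcc_of_min (pat : List Char) (s : List Char) (m : Nat)
    (hm : m < s.length) (hp : pat <+: s.drop m) (hmin : ∀ j, j < m → ¬ pat <+: s.drop j) :
    countOcc pat s = 1 + countOcc pat (s.drop (m + 1)) := by
  rw [countOcc_drop pat m s (by omega) hmin]
  rw [List.drop_eq_getElem_cons hm]
  simp only [countOcc]
  rw [← List.drop_eq_getElem_cons hm]
  simp [hp]

lemma pvFindLoop_eq (hay pat : List Char) (hpat : pat ≠ []) :
    ∀ (start : Nat) (hs : start ≤ hay.length) (cnt : Int),
      pvFindLoop hay pat hpat start hs cnt = cnt + (countOcc pat (hay.drop start) : Int) := by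
  intro start hs cnt
  induction start, hs, cnt using pvFindLoop.induct hay pat hpat with
  | case1 start hs cnt h =>
    rw [pvFindLoop, dif_pos h]
    have hni : ¬ pat <:+: hay.drop start := by
      rw [← PySem.Chars.findFrom_natCast_eq_neg_one_iff hay pat start hs]
      exact h
    rw [countOcc_eq_zero pat _ hni]
    simp
  | case2 start hs cnt h hspec hlt ih =>
    rw [pvFindLoop, dif_neg h]
    rw [ih]
    set i := PySem.Chars.findFrom hay pat (start : Int) none with hi
    have h0 : (start : Int) ≤ i := hspec.1
    have hstart : start ≤ i.toNat := by omega
    have hp : pat <+: hay.drop i.toNat := hspec.2.1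
    have hmin := hspec.2.2
    have key : countOcc pat (hay.drop start) = 1 + countOcc pat (hay.drop (i.toNat + 1)) := by
      have heq1 : start + (i.toNat - start) = i.toNat := by omega
      have heq2 : start + (i.toNat - start + 1) = i.toNat + 1 := by omega
      have hmain := countOcc_of_min pat (hay.drop start) (i.toNat - start)
        (by simp; omega)
        (by rw [List.drop_drop, heq1]; exact hp)
        (fun j hj => by
          rw [List.drop_drop]
          exact hmin (start + j) (by omega) (by omega))
      rw [hmain, List.drop_drop, heq2]
    rw [key]
    push_cast
    ring

lemma foldA_eq (pat : List Char) (c1 c2 : Char) (hpat : pat = [c1, c2]) :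
    ∀ (l : List Char) (p : Char) (c0 : Int),
      (l.foldl (fun (st : Int × Char) ch => (if [st.2, ch] = pat then st.1 + 1 else st.1, ch))
        (c0, p)).1 = c0 + (countOcc pat (p :: l) : Int) := by
  intro l
  induction l with
  | nil =>
    intro p c0
    have : ¬ pat <+: [p] := by
      subst hpat
      rintro ⟨t, ht⟩
      simp at ht
    simp [countOcc, this]
  | cons ch t ih =>
    intro p c0
    simp only [List.foldl_cons]
    rw [ih]
    have hiff : ([p, ch] = pat) ↔ (pat <+: p :: ch :: t) := by
      subst hpat
      constructor
      · rintro h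
        rw [← h]
        exact ⟨t, rfl⟩
      · rintro ⟨u, hu⟩
        simp at hu
        simp [hu.1, hu.2.1]
    by_cases hc : [p, ch] = pat
    · simp only [hc, if_pos]
      have : pat <+: p :: ch :: t := hiff.mp hc
      simp [countOcc, this]
      ring
    · rw [if_neg hc]
      have : ¬ pat <+: p :: ch :: t := fun h => hc (hiff.mpr h)
      simp [countOcc, this]

-- ===== VERDICT (by name: the statement is the Claim_ definition above) =====
theorem stuart_count2_spec : Claim_equal_stuart_count2 := by
  intro source _
  unfold Spec_stuart_count2 stuart_count2 stuart_count2_alt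
  simp only [ne_eq]
  by_cases h : ¬ PySem.List.slice source.toList (some 3) none = ([] : List Char)
  · rw [if_pos h, dif_pos h]
    rw [pvFindLoop_eq, List.drop_zero]
    have h4 : 3 < source.toList.length := by
      rw [PySem.List.slice_from source.toList (by omega : (0:Int) ≤ 3)] at h
      rw [List.drop_eq_nil_iff, not_le] at h
      simpa using h
    have hpatlen : (PySem.List.slice source.toList (some (-2)) none).length = 2 := by
      rw [PySem.List.slice_from_neg_ofNat source.toList 2 (by omega)]
      rw [List.length_drop]
      omega
    obtain ⟨c1, c2, hc12⟩ := List.length_eq_two.mp hpatlen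
    have hhay : PySem.List.slice source.toList none (some (-2)) = source.toList.take (source.toList.length - 2) := by
      rw [PySem.List.slice_to_neg_ofNat source.toList 2 (by omega)]
    obtain ⟨c, rest, hrest⟩ := List.exists_cons_of_ne_nil
      (show source.toList ≠ [] by intro hnil; rw [hnil] at h4; simp at h4)
    have hget : (PySem.List.pyGet? source.toList 0).getD ' ' = c := by
      rw [hrest, PySem.List.pyGet?_zero_cons]; rfl
    have hmid : PySem.List.slice source.toList (some 1) (some (-2)) =
        (source.toList.take (source.toList.length - 2)).drop 1 := by
      simp only [PySem.List.slice, PySem.List.clampIdx_neg_ofNat source.toList.length 2 (by omega)]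
      have h1 : PySem.List.clampIdx source.toList.length 1 = min 1 source.toList.length := by
        exact_mod_cast PySem.List.clampIdx_natCast source.toList.length 1
      have h1' : min 1 source.toList.length = 1 := by omega
      rw [h1, h1', List.drop_take]
    have hr3 : 3 ≤ rest.length := by rw [hrest] at h4; simp at h4; omega
    have hcons : c :: (source.toList.take (source.toList.length - 2)).drop 1 = source.toList.take (source.toList.length - 2) := by
      rw [hrest]
      have hlen2 : (c :: rest).length - 2 = (rest.length - 2) + 1 := by
        simp only [List.length_cons]; omega
      rw [hlen2, List.take_succ_cons, List.drop_one, List.tail_cons]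
    rw [hget, hmid, foldA_eq _ c1 c2 hc12, hcons, hhay]
  · rw [if_neg h, dif_neg h]
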